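-- pv_equiv track=rewrite | github.com/Aklile-Yilma/A2SV-Contest_Repository | contest_9/C_Equal_Rectangles.py | check
-- ===== SOURCE A (Python) =====
-- def check(sticks):
--     left = 0
--     right = len(sticks) -1
--
--     while left <= right:
--         if left == 0:
--             left += 1
--             right -= 1
--             continue
--         else:
--             prev_area = sticks[left-1] * sticks[right+ 1]
--             new_area = sticks[left] * sticks[right]
--
--             if prev_area != new_area:
--                 return False
--
--         left += 1
--         right -= 1
--
--     return True
-- ===== SOURCE B (Python) =====
-- def check(sticks):
--     areas = {a * b for a, b in zip(sticks, reversed(sticks))}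
--     return len(areas) <= 1
-- ===== Notes on version B (the rewrite author's own statement) =====
-- stated objective: simpler
-- what changed: Replaces A's stateful two-pointer inward walk that compares each mirrored pair's area with the previous pair's (with a first-iteration skip) by one set comprehension collecting all mirrored-pair products and a cardinality test len(set) <= 1; no pointers, no reference value, no early exit.
import Mathlib
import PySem

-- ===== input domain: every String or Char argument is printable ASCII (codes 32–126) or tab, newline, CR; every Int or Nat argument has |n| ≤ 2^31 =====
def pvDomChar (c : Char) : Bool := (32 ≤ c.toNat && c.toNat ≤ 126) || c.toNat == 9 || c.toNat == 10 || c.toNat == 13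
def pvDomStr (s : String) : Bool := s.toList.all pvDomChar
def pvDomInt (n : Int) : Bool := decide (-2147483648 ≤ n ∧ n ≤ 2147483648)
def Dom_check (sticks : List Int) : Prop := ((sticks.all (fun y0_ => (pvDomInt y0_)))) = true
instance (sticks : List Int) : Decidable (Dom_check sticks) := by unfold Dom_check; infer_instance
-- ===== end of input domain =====

-- B replaces A's two-pointer inward walk (comparing each mirrored pair's area with the previous
-- pair's) by a set of all mirrored-pair products and the cardinality test len(set) <= 1.

-- ===== PORT A =====
-- the while-loop of A; indices are always in range when dereferenced, so getD 0 never fires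
def checkLoop (sticks : List Int) (left right : Int) : Bool :=
  if _h : left ≤ right then
    if left = 0 then checkLoop sticks (left + 1) (right - 1)
    else
      let prev_area := (PySem.List.pyGet? sticks (left - 1)).getD 0 *
                       (PySem.List.pyGet? sticks (right + 1)).getD 0
      let new_area := (PySem.List.pyGet? sticks left).getD 0 *
                      (PySem.List.pyGet? sticks right).getD 0
      if prev_area ≠ new_area then false
      else checkLoop sticks (left + 1) (right - 1)
  else true
termination_by (right - left + 1).toNat
decreasing_by all_goals omega

def check (sticks : List Int) : Bool :=
  checkLoop sticks 0 ((sticks.length : Int) - 1)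

-- ===== PORT B =====
def check_alt (sticks : List Int) : Bool :=
  let areas : PySem.Set Int :=
    PySem.Set.ofList ((sticks.zip sticks.reverse).map (fun p => p.1 * p.2))
  decide (PySem.Set.len areas ≤ 1)

-- ===== PRECONDITION & SPEC =====
def Spec_check (sticks : List Int) (out : Bool) : Prop := out = check_alt sticks
instance (sticks : List Int) (out : Bool) : Decidable (Spec_check sticks out) := by unfold Spec_check; infer_instance

-- ===== CLAIM (what is proved, stated in full; the proofs are below) =====
def Claim_equal_check : Prop := ∀ (sticks : List Int), Dom_check sticks → Spec_check sticks (check sticks)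

-- ===== LEMMAS AND PROOFS =====

-- the mirrored-pair area at Nat index i
def qArea (s : List Int) (i : Nat) : Int := s.getD i 0 * s.getD (s.length - 1 - i) 0

lemma qArea_symm (s : List Int) (i : Nat) (hi : i < s.length) :
    qArea s (s.length - 1 - i) = qArea s i := by
  unfold qArea
  have : s.length - 1 - (s.length - 1 - i) = i := by omega
  rw [this, mul_comm]

-- chain of adjacent equalities up to M ↔ all equal to q 0 up to M
lemma chain_iff (q : Nat → Int) (M : Nat) :
    (∀ k : Nat, 1 ≤ k → k ≤ M → q k = q (k - 1)) ↔ (∀ k : Nat, k ≤ M → q k = q 0) := by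
  constructor
  · intro h k hk
    induction k with
    | zero => rfl
    | succ m ih =>
      have := h (m + 1) (by omega) hk
      simpa using this.trans (ih (by omega))
  · intro h k hk1 hkM
    have h1 := h k hkM
    have h2 := h (k - 1) (by omega)
    rw [h1, h2]

-- loop characterization: for 1 ≤ l, checkLoop at (l, n-1-l) checks adjacent pairs from l up to (n-1)/2
lemma checkLoop_char (s : List Int) (m l : Nat) (hm : s.length - l ≤ m) (hl : 1 ≤ l) :
    checkLoop s l ((s.length : Int) - 1 - l) =
      decide (∀ k : Nat, k ≤ s.length → l ≤ k → 2 * k ≤ s.length - 1 → qArea s k = qArea s (k - 1)) := by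
  induction m generalizing l with
  | zero =>
    have hln : s.length ≤ l := by omega
    rw [checkLoop]
    rw [dif_neg (by omega)]
    symm
    simp only [decide_eq_true_eq]
    intro k _ hlk h2k
    omega
  | succ m ih =>
    by_cases hc : 2 * l + 1 ≤ s.length
    · -- guard holds
      rw [checkLoop]
      rw [dif_pos (by omega)]
      rw [if_neg (by omega)]
      have e1 : (l : Int) - 1 = ((l - 1 : Nat) : Int) := by omega
      have e2 : (s.length : Int) - 1 - l + 1 = ((s.length - l : Nat) : Int) := by omega
      have e3 : (s.length : Int) - 1 - l = ((s.length - 1 - l : Nat) : Int) := by omega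
      have hprev : (PySem.List.pyGet? s ((l : Int) - 1)).getD 0 *
          (PySem.List.pyGet? s ((s.length : Int) - 1 - l + 1)).getD 0 = qArea s (l - 1) := by
        rw [e1, e2, PySem.List.pyGet?_natCast, PySem.List.pyGet?_natCast]
        unfold qArea
        have : s.length - 1 - (l - 1) = s.length - l := by omega
        rw [this, List.getD_eq_getElem?_getD, List.getD_eq_getElem?_getD]
      have hnew : (PySem.List.pyGet? s (l : Int)).getD 0 *
          (PySem.List.pyGet? s ((s.length : Int) - 1 - l)).getD 0 = qArea s l := by
        rw [e3, PySem.List.pyGet?_natCast, PySem.List.pyGet?_natCast]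
        unfold qArea
        rw [List.getD_eq_getElem?_getD, List.getD_eq_getElem?_getD]
      simp only [hprev, hnew, ne_eq, ite_not]
      by_cases heq : qArea s (l - 1) = qArea s l
      · rw [if_pos heq]
        have estep : (s.length : Int) - 1 - l - 1 = (s.length : Int) - 1 - (l + 1 : Nat) := by
          push_cast; ring
        have el : (l : Int) + 1 = ((l + 1 : Nat) : Int) := by push_cast; ring
        rw [el, estep, ih (l + 1) (by omega) (by omega)]
        rw [decide_eq_decide]
        constructor
        · intro h k hk hlk h2k
          rcases Nat.eq_or_lt_of_le hlk with rfl | hlt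
          · simpa using heq.symm
          · exact h k hk (by omega) h2k
        · intro h k hk hlk h2k
          exact h k hk (by omega) h2k
      · rw [if_neg heq]
        symm
        simp only [decide_eq_false_iff_not]
        intro h
        exact heq ((h l (by omega) le_rfl (by omega)).symm)
    · -- guard fails
      rw [checkLoop]
      rw [dif_neg (by omega)]
      symm
      simp only [decide_eq_true_eq]
      intro k _ hlk h2k
      omega

-- a deduplicated list has at most one element iff all members of the source list coincide
lemma ofList_len_le_one (l : List Int) :
    (PySem.Set.len (PySem.Set.ofList l) ≤ 1) ↔ ∀ x ∈ l, ∀ y ∈ l, x = y := by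
  have hnd : (PySem.Set.ofList l).Nodup := PySem.Set.nodup_ofList l
  have hmem : ∀ x : Int, x ∈ PySem.Set.ofList l ↔ x ∈ l := fun x => PySem.Set.mem_ofList l x
  unfold PySem.Set.len
  constructor
  · intro hlen x hx y hy
    rw [← hmem] at hx hy
    match hs : PySem.Set.ofList l with
    | [] => rw [hs] at hx; exact absurd hx (List.not_mem_nil)
    | [a] =>
      rw [hs] at hx hy
      simp only [List.mem_singleton] at hx hy
      rw [hx, hy]
    | a :: b :: t => rw [hs] at hlen; simp at hlen; omega
  · intro h
    by_contra hlen
    have h0 : 0 < (PySem.Set.ofList l).length := by omega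
    have h1 : 1 < (PySem.Set.ofList l).length := by omega
    have hne : (PySem.Set.ofList l)[0] ≠ (PySem.Set.ofList l)[1] := by
      intro he
      have := (List.Nodup.getElem_inj_iff hnd).mp he
      omega
    exact hne (h _ ((hmem _).mp (List.getElem_mem h0)) _ ((hmem _).mp (List.getElem_mem h1)))

-- B as a predicate over all mirrored pairs
lemma check_alt_char (s : List Int) (hne : s ≠ []) :
    (check_alt s = true) ↔ ∀ i : Nat, i < s.length → qArea s i = qArea s 0 := by
  unfold check_alt
  simp only [decide_eq_true_eq]
  rw [ofList_len_le_one]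
  have hlen : (s.zip s.reverse).length = s.length := by simp
  have hget : ∀ i (hi : i < s.length),
      ((s.zip s.reverse).map (fun p => p.1 * p.2))[i]'(by simpa [hlen]) = qArea s i := by
    intro i hi
    unfold qArea
    rw [List.getD_eq_getElem?_getD, List.getD_eq_getElem?_getD,
      List.getElem?_eq_getElem hi, List.getElem?_eq_getElem (by omega)]
    simp [List.getElem_reverse]
  constructor
  · intro h i hi
    have hn : 0 < s.length := List.length_pos_iff.mpr hne
    have hx := List.getElem_mem (l := (s.zip s.reverse).map (fun p => p.1 * p.2)) (by simpa [hlen] : i < _)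
    have hy := List.getElem_mem (l := (s.zip s.reverse).map (fun p => p.1 * p.2)) (by simpa [hlen] : 0 < _)
    have := h _ hx _ hy
    rwa [hget i hi, hget 0 hn] at this
  · intro h x hx y hy
    rw [List.mem_iff_getElem] at hx hy
    obtain ⟨i, hi, rfl⟩ := hx
    obtain ⟨j, hj, rfl⟩ := hy
    have hi' : i < s.length := by simpa [hlen] using hi
    have hj' : j < s.length := by simpa [hlen] using hj
    rw [hget i hi', hget j hj', h i hi', h j hj']

theorem check_spec_aux (sticks : List Int) : check sticks = check_alt sticks := by
  rcases eq_or_ne sticks [] with rfl | hne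
  · rw [check, checkLoop]
    norm_num [check_alt]
  · have hn : 1 ≤ sticks.length := List.length_pos_iff.mpr hne
    rw [check, checkLoop]
    rw [dif_pos (by omega)]
    rw [if_pos rfl]
    have e : (sticks.length : Int) - 1 - 1 = (sticks.length : Int) - 1 - (0 + 1 : Nat) := by
      push_cast; ring
    have e0 : ((0 : Int) + 1) = ((0 + 1 : Nat) : Int) := by norm_num
    rw [e, e0, checkLoop_char sticks sticks.length (0 + 1) (by omega) (by omega)]
    rw [Bool.eq_iff_iff, decide_eq_true_eq, check_alt_char sticks hne]
    set n := sticks.length with hnn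
    constructor
    · intro h i hi
      have hchain : ∀ k : Nat, k ≤ (n - 1) / 2 → qArea sticks k = qArea sticks 0 := by
        rw [← chain_iff]
        intro k hk1 hk2
        exact h k (by omega) (by omega) (by omega)
      by_cases hhalf : 2 * i ≤ n - 1
      · exact hchain i (by omega)
      · have h1 : n - 1 - i ≤ (n - 1) / 2 := by omega
        rw [← qArea_symm sticks i hi]
        exact hchain (n - 1 - i) h1
    · intro h k hk h1k h2k
      have ha := h k (by omega)
      have hb := h (k - 1) (by omega)
      rw [ha, hb]

-- ===== VERDICT (by name: the statement is the Claim_ definition above) =====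
theorem check_spec : Claim_equal_check := by
  intro sticks _
  unfold Spec_check
  exact check_spec_aux sticks
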